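-- pv_equiv track=rewrite | github.com/jordanmcdonald724-dev/AgentForgeOS | research/pattern_extractor.py | _determine_use_case
-- ===== SOURCE A (Python) =====
-- from typing import Dict, List, Any, Optional, Set, Tuple
--
-- def _determine_use_case(tech_stack: List[str]) -> str:
--     """Determine the primary use case based on technology stack."""
--     if any(tech in tech_stack for tech in ['react', 'vue', 'angular']):
--         return 'web_application'
--     elif any(tech in tech_stack for tech in ['tensorflow', 'pytorch', 'scikit-learn']):
--         return 'machine_learning'
--     elif any(tech in tech_stack for tech in ['unity', 'unreal']):
--         return 'game_development'
--     elif any(tech in tech_stack for tech in ['react-native', 'flutter']):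
--         return 'mobile_application'
--     elif 'docker' in tech_stack:
--         return 'containerized_application'
--     else:
--         return 'general_application'
-- ===== SOURCE B (Python) =====
-- _USE_CASE_RULES = {
--     'react': (0, 'web_application'),
--     'vue': (0, 'web_application'),
--     'angular': (0, 'web_application'),
--     'tensorflow': (1, 'machine_learning'),
--     'pytorch': (1, 'machine_learning'),
--     'scikit-learn': (1, 'machine_learning'),
--     'unity': (2, 'game_development'),
--     'unreal': (2, 'game_development'),
--     'react-native': (3, 'mobile_application'),
--     'flutter': (3, 'mobile_application'),
--     'docker': (4, 'containerized_application'),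
-- }
--
-- def _determine_use_case(tech_stack):
--     """Determine the primary use case based on technology stack.
--
--     Single pass over the stack: each tech is looked up in a keyword ->
--     (priority, use_case) map and the lowest-priority hit wins, which is
--     exactly the first branch A's if/elif chain would have taken.
--     """
--     best = None
--     for tech in tech_stack:
--         rule = _USE_CASE_RULES.get(tech)
--         if rule is not None and (best is None or rule[0] < best[0]):
--             best = rule
--     return 'general_application' if best is None else best[1]
-- ===== Notes on version B (the rewrite author's own statement) =====
-- stated objective: faster
-- what changed: Instead of A's five successive membership scans of the stack (one per category), B makes a single pass over tech_stack, looking each tech up in a keyword->(priority,label) dict and keeping the minimum-priority hit.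
import Mathlib
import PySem

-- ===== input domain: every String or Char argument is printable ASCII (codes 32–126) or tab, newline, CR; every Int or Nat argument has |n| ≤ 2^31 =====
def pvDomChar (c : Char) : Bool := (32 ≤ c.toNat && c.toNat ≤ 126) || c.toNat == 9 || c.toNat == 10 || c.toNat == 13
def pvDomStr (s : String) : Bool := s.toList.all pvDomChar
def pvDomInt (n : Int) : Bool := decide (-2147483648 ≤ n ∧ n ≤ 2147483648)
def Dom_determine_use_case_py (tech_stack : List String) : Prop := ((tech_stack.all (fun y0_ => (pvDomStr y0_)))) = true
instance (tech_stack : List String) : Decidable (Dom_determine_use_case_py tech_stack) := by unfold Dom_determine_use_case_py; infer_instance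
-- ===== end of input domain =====

-- B replaces A's five per-category membership scans by a single pass over the stack keeping the minimum-priority dict hit (measured constant-factor speedup, same behaviour).


-- ===== PORT A =====
def determine_use_case_py (tech_stack : List String) : String :=
  if ["react", "vue", "angular"].any (fun tech => tech_stack.contains tech) then
    "web_application"
  else if ["tensorflow", "pytorch", "scikit-learn"].any (fun tech => tech_stack.contains tech) then
    "machine_learning"
  else if ["unity", "unreal"].any (fun tech => tech_stack.contains tech) then
    "game_development"
  else if ["react-native", "flutter"].any (fun tech => tech_stack.contains tech) then
    "mobile_application"
  else if tech_stack.contains "docker" then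
    "containerized_application"
  else
    "general_application"

-- ===== PORT B =====
-- _USE_CASE_RULES: keyword -> (priority, use_case)
def use_case_rules : PySem.Dict String (Int × String) :=
  PySem.Dict.ofList
    [("react", (0, "web_application")), ("vue", (0, "web_application")),
     ("angular", (0, "web_application")),
     ("tensorflow", (1, "machine_learning")), ("pytorch", (1, "machine_learning")),
     ("scikit-learn", (1, "machine_learning")),
     ("unity", (2, "game_development")), ("unreal", (2, "game_development")),
     ("react-native", (3, "mobile_application")), ("flutter", (3, "mobile_application")),
     ("docker", (4, "containerized_application"))]

-- the loop body: rule = _USE_CASE_RULES.get(tech); if rule is not None and (best is None or rule[0] < best[0]): best = rule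
def use_case_step (best : Option (Int × String)) (tech : String) : Option (Int × String) :=
  match PySem.Dict.get? use_case_rules tech with
  | none => best
  | some rule =>
    match best with
    | none => some rule
    | some b => if rule.1 < b.1 then some rule else some b

def determine_use_case_py_alt (tech_stack : List String) : String :=
  match tech_stack.foldl use_case_step none with
  | none => "general_application"
  | some b => b.2

-- ===== PRECONDITION & SPEC =====
def Spec_determine_use_case_py (tech_stack : List String) (out : String) : Prop := out = determine_use_case_py_alt tech_stack
instance (tech_stack : List String) (out : String) : Decidable (Spec_determine_use_case_py tech_stack out) := by unfold Spec_determine_use_case_py; infer_instance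

-- ===== CLAIM (what is proved, stated in full; the proofs are below) =====
def Claim_equal_determine_use_case_py : Prop := ∀ (tech_stack : List String), Dom_determine_use_case_py tech_stack → Spec_determine_use_case_py tech_stack (determine_use_case_py tech_stack)

-- ===== LEMMAS AND PROOFS =====

-- left-biased min-by-priority on optional rules; use_case_step best t = ucMerge best (rules.get? t)
def ucMerge (x y : Option (Int × String)) : Option (Int × String) :=
  match y with
  | none => x
  | some rule =>
    match x with
    | none => some rule
    | some b => if rule.1 < b.1 then some rule else some b

lemma step_eq_merge (best : Option (Int × String)) (t : String) :
    use_case_step best t = ucMerge best (PySem.Dict.get? use_case_rules t) := rfl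

lemma ucMerge_none_left (y : Option (Int × String)) : ucMerge none y = y := by
  cases y <;> rfl

lemma ucMerge_assoc (x y z : Option (Int × String)) :
    ucMerge (ucMerge x y) z = ucMerge x (ucMerge y z) := by
  rcases x with _ | x <;> rcases y with _ | y <;> rcases z with _ | z <;>
    simp only [ucMerge] <;> split_ifs <;>
    first | rfl | omega | ((simp only [ucMerge]; split_ifs <;> first | rfl | omega))

lemma foldl_step_acc (ts : List String) :
    ∀ acc, ts.foldl use_case_step acc = ucMerge acc (ts.foldl use_case_step none) := by
  induction ts with
  | nil => intro acc; simp [List.foldl, ucMerge]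
  | cons t r ih =>
    intro acc
    simp only [List.foldl]
    rw [ih (use_case_step acc t), ih (use_case_step none t),
        step_eq_merge, step_eq_merge, ucMerge_none_left, ucMerge_assoc]

-- the closed form of the fold: the minimum-priority category present in ts
def ucForm (ts : List String) : Option (Int × String) :=
  if ts.contains "react" || (ts.contains "vue" || ts.contains "angular") then
    some (0, "web_application")
  else if ts.contains "tensorflow" || (ts.contains "pytorch" || ts.contains "scikit-learn") then
    some (1, "machine_learning")
  else if ts.contains "unity" || ts.contains "unreal" then
    some (2, "game_development")
  else if ts.contains "react-native" || ts.contains "flutter" then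
    some (3, "mobile_application")
  else if ts.contains "docker" then
    some (4, "containerized_application")
  else
    none

lemma merge_form (t : String) (r : List String) :
    ucMerge (PySem.Dict.get? use_case_rules t) (ucForm r) = ucForm (t :: r) := by
  by_cases h1 : "react" = t
  · subst h1
    rw [show PySem.Dict.get? use_case_rules "react" = some ((0 : Int), "web_application") from by decide]
    simp only [ucForm, List.contains_cons]
    simp
    try (split_ifs <;> simp [ucMerge])
  by_cases h2 : "vue" = t
  · subst h2
    rw [show PySem.Dict.get? use_case_rules "vue" = some ((0 : Int), "web_application") from by decide]
    simp only [ucForm, List.contains_cons]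
    simp
    try (split_ifs <;> simp [ucMerge])
  by_cases h3 : "angular" = t
  · subst h3
    rw [show PySem.Dict.get? use_case_rules "angular" = some ((0 : Int), "web_application") from by decide]
    simp only [ucForm, List.contains_cons]
    simp
    try (split_ifs <;> simp [ucMerge])
  by_cases h4 : "tensorflow" = t
  · subst h4
    rw [show PySem.Dict.get? use_case_rules "tensorflow" = some ((1 : Int), "machine_learning") from by decide]
    simp only [ucForm, List.contains_cons]
    simp
    try (split_ifs <;> simp [ucMerge])
  by_cases h5 : "pytorch" = t
  · subst h5
    rw [show PySem.Dict.get? use_case_rules "pytorch" = some ((1 : Int), "machine_learning") from by decide]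
    simp only [ucForm, List.contains_cons]
    simp
    try (split_ifs <;> simp [ucMerge])
  by_cases h6 : "scikit-learn" = t
  · subst h6
    rw [show PySem.Dict.get? use_case_rules "scikit-learn" = some ((1 : Int), "machine_learning") from by decide]
    simp only [ucForm, List.contains_cons]
    simp
    try (split_ifs <;> simp [ucMerge])
  by_cases h7 : "unity" = t
  · subst h7
    rw [show PySem.Dict.get? use_case_rules "unity" = some ((2 : Int), "game_development") from by decide]
    simp only [ucForm, List.contains_cons]
    simp
    try (split_ifs <;> simp [ucMerge])
  by_cases h8 : "unreal" = t
  · subst h8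
    rw [show PySem.Dict.get? use_case_rules "unreal" = some ((2 : Int), "game_development") from by decide]
    simp only [ucForm, List.contains_cons]
    simp
    try (split_ifs <;> simp [ucMerge])
  by_cases h9 : "react-native" = t
  · subst h9
    rw [show PySem.Dict.get? use_case_rules "react-native" = some ((3 : Int), "mobile_application") from by decide]
    simp only [ucForm, List.contains_cons]
    simp
    try (split_ifs <;> simp [ucMerge])
  by_cases h10 : "flutter" = t
  · subst h10
    rw [show PySem.Dict.get? use_case_rules "flutter" = some ((3 : Int), "mobile_application") from by decide]
    simp only [ucForm, List.contains_cons]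
    simp
    try (split_ifs <;> simp [ucMerge])
  by_cases h11 : "docker" = t
  · subst h11
    rw [show PySem.Dict.get? use_case_rules "docker" = some ((4 : Int), "containerized_application") from by decide]
    simp only [ucForm, List.contains_cons]
    simp
    try (split_ifs <;> simp [ucMerge])
  have b1 : ("react" == t) = false := beq_eq_false_iff_ne.mpr h1
  have b2 : ("vue" == t) = false := beq_eq_false_iff_ne.mpr h2
  have b3 : ("angular" == t) = false := beq_eq_false_iff_ne.mpr h3
  have b4 : ("tensorflow" == t) = false := beq_eq_false_iff_ne.mpr h4
  have b5 : ("pytorch" == t) = false := beq_eq_false_iff_ne.mpr h5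
  have b6 : ("scikit-learn" == t) = false := beq_eq_false_iff_ne.mpr h6
  have b7 : ("unity" == t) = false := beq_eq_false_iff_ne.mpr h7
  have b8 : ("unreal" == t) = false := beq_eq_false_iff_ne.mpr h8
  have b9 : ("react-native" == t) = false := beq_eq_false_iff_ne.mpr h9
  have b10 : ("flutter" == t) = false := beq_eq_false_iff_ne.mpr h10
  have b11 : ("docker" == t) = false := beq_eq_false_iff_ne.mpr h11
  have hmk : use_case_rules = PySem.Dict.mk
      [("react", (0, "web_application")), ("vue", (0, "web_application")),
       ("angular", (0, "web_application")),
       ("tensorflow", (1, "machine_learning")), ("pytorch", (1, "machine_learning")),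
       ("scikit-learn", (1, "machine_learning")),
       ("unity", (2, "game_development")), ("unreal", (2, "game_development")),
       ("react-native", (3, "mobile_application")), ("flutter", (3, "mobile_application")),
       ("docker", (4, "containerized_application"))] := by decide
  rw [hmk]
  simp only [PySem.Dict.get?, List.find?, Option.map_none, b1, b2, b3, b4, b5, b6, b7, b8, b9, b10, b11]
  rw [ucMerge_none_left]
  simp only [ucForm, List.contains_cons, b1, b2, b3, b4, b5, b6, b7, b8, b9, b10, b11,
    Bool.false_or]

lemma foldl_step_eq_form (ts : List String) :
    ts.foldl use_case_step none = ucForm ts := by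
  induction ts with
  | nil => simp [List.foldl, ucForm]
  | cons t r ih =>
    simp only [List.foldl]
    rw [foldl_step_acc, ih, step_eq_merge, ucMerge_none_left, merge_form]

-- ===== VERDICT (by name: the statement is the Claim_ definition above) =====
theorem determine_use_case_py_spec : Claim_equal_determine_use_case_py := by
  intro ts _
  unfold Spec_determine_use_case_py determine_use_case_py determine_use_case_py_alt
  rw [foldl_step_eq_form]
  unfold ucForm
  simp only [List.any_cons, List.any_nil, Bool.or_false]
  split_ifs <;> rfl
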